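-- pv_equiv track=rewrite | github.com/Masonzton/Detective_Problem | select_sampling.py | atoms_to_interview
-- ===== SOURCE A (Python) =====
-- from typing import List
-- import math
--
-- def atoms_to_interview(atoms: List[List[int]]) -> List[List[int]]:
--     number_of_atoms = len(atoms)
--     # length of the list should be a power of two
--     assert (number_of_atoms & (number_of_atoms - 1) == 0) and number_of_atoms != 0
--     number_of_interviews = int(math.log2(number_of_atoms))
--     sample_list = []
--     for interview_number in range(number_of_interviews):
--         current_interview = []
--         for atom_number in range(number_of_atoms):
--             if atom_number & (1 << interview_number):
--                 current_interview.extend(atoms[atom_number])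
--         sample_list.append(current_interview)
--
--     return sample_list
-- ===== SOURCE B (Python) =====
-- def atoms_to_interview(atoms):
--     number_of_atoms = len(atoms)
--     # length of the list should be a power of two
--     assert (number_of_atoms & (number_of_atoms - 1) == 0) and number_of_atoms != 0
--     if number_of_atoms == 1:
--         return []
--     half = number_of_atoms // 2
--     left = atoms_to_interview(atoms[:half])
--     right = atoms_to_interview(atoms[half:])
--     # interview i (i < k-1) splits positionally: low-half indices and high-half
--     # indices have the same low bits, so each recursive interview is a contiguous
--     # run; the last interview is exactly the whole upper half flattened.
--     merged = [l + r for l, r in zip(left, right)]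
--     last = [x for atom in atoms[half:] for x in atom]
--     return merged + [last]
-- ===== Notes on version B (the rewrite author's own statement) =====
-- stated objective: alternative
-- what changed: Replaced the iterative gather (for each interview index, scan all atoms testing a bit of their position) by a divide-and-conquer recursion: split the list in halves, recurse on each, zip the half results pairwise with concatenation, and append the flattened upper half as the last interview; B contains no bit arithmetic at all.
import Mathlib
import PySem

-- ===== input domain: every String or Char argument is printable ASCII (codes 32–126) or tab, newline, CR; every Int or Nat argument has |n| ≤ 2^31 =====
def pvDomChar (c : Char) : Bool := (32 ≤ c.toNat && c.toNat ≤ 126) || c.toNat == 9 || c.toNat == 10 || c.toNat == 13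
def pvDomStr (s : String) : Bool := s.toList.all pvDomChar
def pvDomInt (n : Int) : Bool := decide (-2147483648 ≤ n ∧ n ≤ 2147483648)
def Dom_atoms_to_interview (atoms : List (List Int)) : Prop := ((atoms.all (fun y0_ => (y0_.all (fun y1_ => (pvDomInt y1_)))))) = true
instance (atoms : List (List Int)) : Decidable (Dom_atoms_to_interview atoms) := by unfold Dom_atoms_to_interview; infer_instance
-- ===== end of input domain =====

-- B replaces A's per-interview bit-test gather by a divide-and-conquer recursion on the two
-- halves of the list (alternative decomposition; no bit arithmetic at all in B).


-- ===== PORT A =====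
-- inner loop: `for atom_number in range(number_of_atoms): if atom_number & (1 << i): current.extend(atoms[atom_number])`
-- indices are naturals 0..n-1, always in range, so List.range / List.getD is exact here.
def pvGather (atoms : List (List Int)) (n : Nat) (i : Nat) : List Int :=
  (List.range n).foldl
    (fun cur j => if j &&& (1 <<< i) ≠ 0 then cur ++ atoms.getD j [] else cur) []

-- `int(math.log2(n))` is exact for the power-of-two lengths admitted by the assert; ported as Nat.log2.
def atoms_to_interview (atoms : List (List Int)) : List (List Int) :=
  let number_of_atoms := atoms.length
  let number_of_interviews := Nat.log2 number_of_atoms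
  (List.range number_of_interviews).foldl
    (fun sample_list i => sample_list ++ [pvGather atoms number_of_atoms i]) []

-- ===== PORT B =====
-- Source B's recursion: base case `n == 1 → []`; else recurse on the two halves, zip the results
-- pairwise with ++, and append the flattened upper half as the last interview.
-- The guard is `length ≤ 1` (not `= 1`) only so the recursion is total on length 0,
-- where the Python assert raises (outside Pre_).
def atoms_to_interview_alt (atoms : List (List Int)) : List (List Int) :=
  if _h : atoms.length ≤ 1 then []
  else
    let half := atoms.length / 2
    (List.zipWith (· ++ ·) (atoms_to_interview_alt (atoms.take half))
        (atoms_to_interview_alt (atoms.drop half)))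
      ++ [(atoms.drop half).flatMap id]
termination_by atoms.length
decreasing_by
  · simp only [List.length_take]; omega
  · simp only [List.length_drop]; omega

-- ===== PRECONDITION & SPEC =====
-- Pre_ excludes exactly the inputs on which A's assert raises: the number of atoms must be a
-- nonzero power of two.
def Pre_atoms_to_interview (atoms : List (List Int)) : Prop :=
  atoms.length ≠ 0 ∧ atoms.length &&& (atoms.length - 1) = 0
instance (atoms : List (List Int)) : Decidable (Pre_atoms_to_interview atoms) := by
  unfold Pre_atoms_to_interview; infer_instance

def pvWitness_atoms_to_interview : List (List Int) := [[1], [2], [3], [4]]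

def Spec_atoms_to_interview (atoms : List (List Int)) (out : List (List Int)) : Prop := out = atoms_to_interview_alt atoms
instance (atoms : List (List Int)) (out : List (List Int)) : Decidable (Spec_atoms_to_interview atoms out) := by unfold Spec_atoms_to_interview; infer_instance

-- ===== CLAIM (what is proved, stated in full; the proofs are below) =====
def Claim_equal_atoms_to_interview : Prop := ∀ (atoms : List (List Int)), Dom_atoms_to_interview atoms → Pre_atoms_to_interview atoms → Spec_atoms_to_interview atoms (atoms_to_interview atoms)

-- ===== LEMMAS AND PROOFS =====

-- the common specification of interview q, with an explicit index offset o
def pvSelO (l : List (List Int)) (o q : Nat) : List Int :=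
  ((l.zipIdx o).filter (fun p => p.2.testBit q)).flatMap (·.1)

theorem foldl_if_append {α : Type} (F : α → List Int) (Q : α → Bool) :
    ∀ (l : List α) (acc : List Int),
      l.foldl (fun cur x => if Q x then cur ++ F x else cur) acc
        = acc ++ (l.filter Q).flatMap F := by
  intro l
  induction l with
  | nil => simp
  | cons a t ih =>
    intro acc
    by_cases h : Q a = true <;> simp [List.foldl_cons, h, ih]

theorem foldl_append_singleton {α : Type} (f : α → List Int) :
    ∀ (l : List α) (acc : List (List Int)),
      l.foldl (fun s x => s ++ [f x]) acc = acc ++ l.map f := by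
  intro l
  induction l with
  | nil => simp
  | cons a t ih => intro acc; simp [List.foldl_cons, ih]

theorem and_shift_ne (j i : Nat) : (j &&& (1 <<< i) ≠ 0) ↔ j.testBit i := by
  rw [Nat.shiftLeft_eq, one_mul, Nat.and_two_pow]
  cases h : j.testBit i <;> simp

theorem gather_eq_sel (atoms : List (List Int)) (i : Nat) :
    pvGather atoms atoms.length i = pvSelO atoms 0 i := by
  unfold pvGather pvSelO
  rw [show List.range atoms.length = (atoms.zipIdx.map Prod.snd) by
        rw [List.zipIdx_map_snd, List.range_eq_range'],
      List.foldl_map]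
  rw [PySem.List.foldl_congr_mem atoms.zipIdx _ (fun cur (p : List Int × Nat) =>
        if p.2.testBit i then cur ++ p.1 else cur) [] ?_]
  · exact foldl_if_append (·.1) (fun p => p.2.testBit i) atoms.zipIdx []
  · intro cur p hp
    obtain ⟨x, k, rfl⟩ : ∃ x k, p = (x, k) := ⟨p.1, p.2, rfl⟩
    have h := List.mem_zipIdx hp
    have hk : k < atoms.length := by simpa using h.2.1
    have hx : x = atoms[k] := by simpa using h.2.2
    have : atoms.getD k [] = x := by
      rw [hx, List.getD_eq_getElem _ _ hk]
    simp only [this]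
    by_cases hb : k.testBit i
    · simp [hb, (and_shift_ne k i).2 hb]
    · have : ¬ (k &&& (1 <<< i) ≠ 0) := fun hc => hb ((and_shift_ne k i).1 hc)
      simp [hb, this]

-- interviews split positionally: shifting every index by 2^k does not change bits below k
theorem selO_shift (k q : Nat) (hq : q < k) :
    ∀ (l : List (List Int)) (o : Nat), pvSelO l (2 ^ k + o) q = pvSelO l o q := by
  intro l
  induction l with
  | nil => intro o; rfl
  | cons a t ih =>
    intro o
    unfold pvSelO
    simp only [List.zipIdx_cons, List.filter_cons]
    rw [Nat.testBit_two_pow_add_gt hq]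
    have := ih (o + 1)
    rw [show 2 ^ k + o + 1 = 2 ^ k + (o + 1) by omega]
    unfold pvSelO at this
    by_cases hb : o.testBit q <;> simp [hb, this]

-- indices below 2^k have bit k clear: the low half contributes nothing to interview k
theorem selO_top_low (k : Nat) :
    ∀ (l : List (List Int)) (o : Nat), o + l.length ≤ 2 ^ k → pvSelO l o k = [] := by
  intro l
  induction l with
  | nil => intro o _; rfl
  | cons a t ih =>
    intro o hlen
    unfold pvSelO
    simp only [List.zipIdx_cons, List.filter_cons]
    rw [Nat.testBit_lt_two_pow (by simp at hlen; omega)]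
    have := ih (o + 1) (by simp at hlen ⊢; omega)
    unfold pvSelO at this
    simpa using this

theorem testBit_two_pow_add_self (k j : Nat) (hj : j < 2 ^ k) :
    (2 ^ k + j).testBit k = true := by
  rw [Nat.testBit_two_pow_add_eq, Nat.testBit_lt_two_pow hj]
  rfl

-- indices 2^k..2^k+2^k-1 all have bit k set: the high half is taken whole for interview k
theorem selO_top_high (k : Nat) :
    ∀ (l : List (List Int)) (o : Nat), o + l.length ≤ 2 ^ k →
      pvSelO l (2 ^ k + o) k = l.flatMap id := by
  intro l
  induction l with
  | nil => intro o _; rfl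
  | cons a t ih =>
    intro o hlen
    unfold pvSelO
    simp only [List.zipIdx_cons, List.filter_cons]
    rw [testBit_two_pow_add_self k o (by simp at hlen; omega)]
    have := ih (o + 1) (by simp at hlen ⊢; omega)
    rw [show 2 ^ k + o + 1 = 2 ^ k + (o + 1) by omega]
    unfold pvSelO at this
    simp [this]

theorem zipWith_map_same {α β : Type} (f : β → β → β) (g h : α → β) (l : List α) :
    List.zipWith f (l.map g) (l.map h) = l.map (fun x => f (g x) (h x)) := by
  induction l with
  | nil => rfl
  | cons a t ih => simp [ih]

theorem selO_append (q : Nat) (L H : List (List Int)) (o : Nat) :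
    pvSelO (L ++ H) o q = pvSelO L o q ++ pvSelO H (o + L.length) q := by
  unfold pvSelO
  rw [List.zipIdx_append, List.filter_append, List.flatMap_append]

-- B computes interview q = pvSelO l 0 q for every q < k, by induction on the halving
theorem alt_eq_sel : ∀ (k : Nat) (l : List (List Int)), l.length = 2 ^ k →
    atoms_to_interview_alt l = (List.range k).map (pvSelO l 0) := by
  intro k
  induction k with
  | zero =>
    intro l hl
    rw [atoms_to_interview_alt]
    simp [hl]
  | succ k ih =>
    intro l hl
    have hpow : (1:Nat) ≤ 2 ^ k := Nat.one_le_two_pow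
    have hlen2 : ¬ l.length ≤ 1 := by rw [hl, Nat.pow_succ]; omega
    have hhalf : l.length / 2 = 2 ^ k := by rw [hl, Nat.pow_succ]; omega
    have hLlen : (l.take (l.length / 2)).length = 2 ^ k := by
      rw [List.length_take, hhalf, hl, Nat.pow_succ]; omega
    have hHlen : (l.drop (l.length / 2)).length = 2 ^ k := by
      rw [List.length_drop, hhalf, hl, Nat.pow_succ]; omega
    rw [atoms_to_interview_alt]
    simp only [hlen2, dite_false]
    rw [ih _ hLlen, ih _ hHlen, zipWith_map_same, List.range_succ, List.map_append]
    have hsplit : l = l.take (l.length / 2) ++ l.drop (l.length / 2) :=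
      (List.take_append_drop _ l).symm
    congr 1
    · -- interviews 0..k-1: positional split
      apply List.map_congr_left
      intro q hq
      have hq' : q < k := List.mem_range.mp hq
      conv_rhs => rw [hsplit]
      rw [selO_append, hLlen, Nat.zero_add,
          show (2:Nat) ^ k = 2 ^ k + 0 by omega, selO_shift k q hq']
    · -- interview k: the flattened upper half
      simp only [List.map_cons, List.map_nil]
      congr 1
      conv_rhs => rw [hsplit]
      rw [selO_append, hLlen, Nat.zero_add,
          selO_top_low k _ 0 (by rw [hLlen]; omega),
          show (2:Nat) ^ k = 2 ^ k + 0 by omega,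
          selO_top_high k _ 0 (by rw [hHlen]; omega)]
      simp

-- `n & (n-1) == 0 and n != 0` characterises the powers of two
theorem pow_two_of_and_pred : ∀ (n : Nat), n ≠ 0 → n &&& (n - 1) = 0 → ∃ k, n = 2 ^ k := by
  intro n
  induction n using Nat.strong_induction_on with
  | _ n ih =>
    intro hn hand
    rcases Nat.lt_or_ge n 2 with h2 | h2
    · exact ⟨0, by omega⟩
    rcases Nat.even_or_odd n with he | ho
    · -- n even: n/2 satisfies the same condition
      obtain ⟨m, hm⟩ := he
      have hm2 : n = 2 * m := by omega
      have hmn : m < n := by omega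
      have hm0 : m ≠ 0 := by omega
      have hand' : m &&& (m - 1) = 0 := by
        apply Nat.eq_of_testBit_eq
        intro i
        rw [Nat.zero_testBit, Nat.testBit_and]
        have h1 : m.testBit i = n.testBit (i + 1) := by
          rw [Nat.testBit_succ, hm2, Nat.mul_div_cancel_left _ (by norm_num)]
        have h2' : (m - 1).testBit i = (n - 1).testBit (i + 1) := by
          rw [Nat.testBit_succ, show (n - 1) / 2 = m - 1 by omega]
        rw [h1, h2', ← Nat.testBit_and, hand, Nat.zero_testBit]
      obtain ⟨k, hk⟩ := ih m hmn hm0 hand'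
      exact ⟨k + 1, by rw [hm2, hk, Nat.pow_succ]; ring⟩
    · -- n odd and ≥ 3: n and n-1 share a bit above 0, contradiction
      exfalso
      obtain ⟨a, ha⟩ := ho
      have ha0 : a ≠ 0 := by omega
      have : ∃ i, a.testBit i = true := by
        by_contra hno
        push Not at hno
        exact ha0 (Nat.eq_of_testBit_eq (fun i => by
          rw [Nat.zero_testBit, Bool.eq_false_iff]
          exact hno i))
      obtain ⟨i, hi⟩ := this
      have hn1 : n.testBit (i + 1) = true := by
        rw [Nat.testBit_succ, show n / 2 = a by omega, hi]
      have hn2 : (n - 1).testBit (i + 1) = true := by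
        rw [Nat.testBit_succ, show (n - 1) / 2 = a by omega, hi]
      have : (n &&& (n - 1)).testBit (i + 1) = true := by
        rw [Nat.testBit_and, hn1, hn2]; rfl
      rw [hand, Nat.zero_testBit] at this
      exact absurd this (by simp)

-- ===== VERDICT (by name: the statement is the Claim_ definition above) =====
theorem atoms_to_interview_spec : Claim_equal_atoms_to_interview := by
  intro atoms _ hpre
  obtain ⟨hne, hand⟩ := hpre
  obtain ⟨k, hk⟩ := pow_two_of_and_pred atoms.length hne hand
  unfold Spec_atoms_to_interview atoms_to_interview
  simp only []
  rw [foldl_append_singleton, List.nil_append, alt_eq_sel k atoms hk, hk, Nat.log2_two_pow]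
  exact List.map_congr_left (fun i _ => by
    rw [show (2:Nat) ^ k = atoms.length from hk.symm, gather_eq_sel])
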